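-- pv_equiv track=rewrite | github.com/posl/comment_recommendation | script/split_gen/4_time/ja/208_C/9.py | calc
-- ===== SOURCE A (Python) =====
-- def calc(n, k, a):
--     if k >= n:
--         return [k//n]*n
--     else:
--         a.sort()
--         r = [0]*n
--         for i in range(k):
--             r[a[i]-1] += 1
--         return r
-- ===== SOURCE B (Python) =====
-- def calc(n, k, a):
--     if k >= n:
--         return [k // n] * n
--     cnt = {}
--     for v in a:
--         cnt[v] = cnt.get(v, 0) + 1
--     r = [0] * n
--     rem = k
--     for v in sorted(cnt):
--         if rem <= 0:
--             break
--         t = cnt[v] if cnt[v] < rem else rem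
--         r[v - 1] += t
--         rem -= t
--     return r
-- ===== Notes on version B (the rewrite author's own statement) =====
-- stated objective: alternative
-- what changed: Instead of fully sorting the list and doing k unit increments, B builds a value->count dictionary in one pass, sorts only the distinct values, and adds whole counts (capped by the remaining budget k) in one bulk update per distinct value; only the distinct values are sorted, and duplicate-heavy inputs do far less work.
import Mathlib
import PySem

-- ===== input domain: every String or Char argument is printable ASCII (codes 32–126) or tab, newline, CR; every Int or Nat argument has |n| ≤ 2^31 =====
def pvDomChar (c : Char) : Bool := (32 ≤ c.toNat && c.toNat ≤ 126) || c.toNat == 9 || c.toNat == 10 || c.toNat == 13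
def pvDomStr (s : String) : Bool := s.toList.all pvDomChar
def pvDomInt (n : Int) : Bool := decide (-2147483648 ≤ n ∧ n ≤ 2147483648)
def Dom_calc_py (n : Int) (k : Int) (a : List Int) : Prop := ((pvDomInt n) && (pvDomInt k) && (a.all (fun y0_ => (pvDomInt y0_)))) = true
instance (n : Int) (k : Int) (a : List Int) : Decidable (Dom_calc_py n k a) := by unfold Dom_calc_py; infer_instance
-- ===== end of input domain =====

-- B replaces the full sort + k unit increments with a count dictionary, a sort of the
-- distinct values only, and one capped bulk addition per distinct value (objective: alternative).
-- Note: Python A sorts `a` in place; the equivalence proved here is about the return value only.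

-- ===== PORT A =====
def calc_py (n : Int) (k : Int) (a : List Int) : List Int :=
  if k ≥ n then PySem.List.pyRepeat [PySem.Int.floordiv k n] n
  else
    let s := PySem.List.sorted a (fun x => x)
    (PySem.List.pyRange 0 k 1).foldl
      (fun r i =>
        let v := PySem.List.pyGetD s i 0
        PySem.List.pySetD r (v - 1) (PySem.List.pyGetD r (v - 1) 0 + 1))
      (PySem.List.pyRepeat [0] n)

-- ===== PORT B =====
def calc_py_alt (n : Int) (k : Int) (a : List Int) : List Int :=
  if k ≥ n then PySem.List.pyRepeat [PySem.Int.floordiv k n] n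
  else
    let cnt := a.foldl (fun d v => d.insert v (d.getD v 0 + 1)) PySem.Dict.empty
    ((PySem.List.sorted cnt.keys (fun x => x)).foldl
      (fun (st : List Int × Int) v =>
        if st.2 ≤ 0 then st
        else
          let t := if cnt.getD v 0 < st.2 then cnt.getD v 0 else st.2
          (PySem.List.pySetD st.1 (v - 1) (PySem.List.pyGetD st.1 (v - 1) 0 + t), st.2 - t))
      (PySem.List.pyRepeat [0] n, k)).1

-- ===== PRECONDITION & SPEC =====
-- Pre_ excludes exactly the inputs on which the Python A raises: n = 0 with k ≥ n
-- (ZeroDivisionError), and, when k < n with k > 0: k beyond len(a), or one of the k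
-- smallest values giving an index outside [-n, n-1] (IndexError).
def Pre_calc_py (n : Int) (k : Int) (a : List Int) : Prop :=
  if k ≥ n then n ≠ 0
  else k ≤ 0 ∨ (k ≤ (a.length : Int) ∧ a.countP (fun v => v < 1 - n) = 0 ∧
                k ≤ (a.countP (fun v => v ≤ n) : Int))
instance (n : Int) (k : Int) (a : List Int) : Decidable (Pre_calc_py n k a) := by
  unfold Pre_calc_py; infer_instance
def pvWitness_calc_py : Int × Int × List Int := (3, 2, [1, 2, 3])

def Spec_calc_py (n : Int) (k : Int) (a : List Int) (out : List Int) : Prop := out = calc_py_alt n k a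
instance (n : Int) (k : Int) (a : List Int) (out : List Int) : Decidable (Spec_calc_py n k a out) := by unfold Spec_calc_py; infer_instance

-- ===== CLAIM (what is proved, stated in full; the proofs are below) =====
def Claim_equal_calc_py : Prop := ∀ (n : Int) (k : Int) (a : List Int), Dom_calc_py n k a → Pre_calc_py n k a → Spec_calc_py n k a (calc_py n k a)
-- ===== LEMMAS AND PROOFS =====

-- `r[j] += t` with Python index semantics (no-op where Python would raise).
def pvBump (r : List Int) (j t : Int) : List Int :=
  PySem.List.pySetD r j (PySem.List.pyGetD r j 0 + t)

-- one step of B's loop, with the count function abstracted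
def pvStep (c : Int → Int) (st : List Int × Int) (v : Int) : List Int × Int :=
  if st.2 ≤ 0 then st
  else (pvBump st.1 (v - 1) (if c v < st.2 then c v else st.2),
        st.2 - (if c v < st.2 then c v else st.2))

lemma pvIdx_lt {nn : Nat} {i : Int} {m : Nat} (h : PySem.List.pyIdx? nn i = some m) : m < nn := by
  unfold PySem.List.pyIdx? at h
  split_ifs at h <;> simp_all <;> omega

lemma pvBump_zero (r : List Int) (j : Int) : pvBump r j 0 = r := by
  unfold pvBump PySem.List.pySetD PySem.List.pySet? PySem.List.pyGetD PySem.List.pyGet?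
  cases h : PySem.List.pyIdx? r.length j with
  | none => simp
  | some m =>
    have hm := pvIdx_lt h
    simp [List.getElem?_eq_getElem hm, List.set_getElem_self]

lemma pvBump_bump (r : List Int) (j x y : Int) :
    pvBump (pvBump r j x) j y = pvBump r j (x + y) := by
  unfold pvBump PySem.List.pySetD PySem.List.pySet? PySem.List.pyGetD PySem.List.pyGet?
  cases h : PySem.List.pyIdx? r.length j with
  | none => simp [h]
  | some m =>
    have hm := pvIdx_lt h
    simp [h, List.set_set, hm]
    congr 1
    ring

lemma pvBump_repl (v : Int) (t : Nat) :
    ∀ r : List Int,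
      (List.replicate t v).foldl (fun r w => pvBump r (w - 1) 1) r = pvBump r (v - 1) (t : Int) := by
  induction t with
  | zero => intro r; simp [pvBump_zero]
  | succ t ih =>
    intro r
    rw [List.replicate_succ, List.foldl_cons, ih, pvBump_bump]
    norm_num
    ring_nf

lemma pvFold_skip (c : Int → Int) (ks : List Int) :
    ∀ st : List Int × Int, st.2 ≤ 0 → ks.foldl (pvStep c) st = st := by
  induction ks with
  | nil => intro st _; rfl
  | cons v ks ih =>
    intro st h
    rw [List.foldl_cons, pvStep, if_pos h, ih st h]

lemma pvDecomp (s : List Int) (v : Int) (hs : s.Pairwise (· ≤ ·)) (hmin : ∀ w ∈ s, v ≤ w) :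
    s = List.replicate (s.count v) v ++ s.drop (s.count v) := by
  induction s with
  | nil => simp
  | cons x s ih =>
    rcases List.pairwise_cons.mp hs with ⟨hx, hs'⟩
    by_cases hxv : x = v
    · subst hxv
      rw [List.count_cons_self]
      have := ih hs' (fun w hw => le_trans (hmin x (List.mem_cons_self)) (hx w hw))
      simpa [List.replicate_succ] using congrArg (x :: ·) this
    · have hvx : v < x := lt_of_le_of_ne (hmin x (List.mem_cons_self)) (fun h => hxv h.symm)
      have hnot : v ∉ x :: s := by
        intro hm
        rcases List.mem_cons.mp hm with h | h
        · exact hxv h.symm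
        · exact absurd (hx v h) (not_le.mpr hvx)
      rw [List.count_eq_zero.mpr hnot]
      simp

lemma pvMain (c : Int → Int) (ks : List Int) :
    ∀ (s r : List Int) (rem : Int),
      s.Pairwise (· ≤ ·) → ks.Pairwise (· < ·) →
      (∀ w, w ∈ ks ↔ w ∈ s) →
      (∀ v ∈ ks, c v = (s.count v : Int)) →
      rem.toNat ≤ s.length →
      (ks.foldl (pvStep c) (r, rem)).1
        = (s.take rem.toNat).foldl (fun r w => pvBump r (w - 1) 1) r := by
  induction ks with
  | nil =>
    intro s r rem _ _ hmem _ _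
    have : s = [] := by
      cases s with
      | nil => rfl
      | cons x s => exact absurd ((hmem x).mpr List.mem_cons_self) (List.not_mem_nil)
    simp [this]
  | cons v ks ih =>
    intro s r rem hs hks hmem hc hrem
    by_cases hrem0 : rem ≤ 0
    · rw [pvFold_skip c _ _ hrem0]
      simp [Int.toNat_of_nonpos hrem0]
    · rw [not_le] at hrem0
      rcases List.pairwise_cons.mp hks with ⟨hvlt, hks'⟩
      have hvs : v ∈ s := (hmem v).mp List.mem_cons_self
      have hmin : ∀ w ∈ s, v ≤ w := by
        intro w hw
        rcases List.mem_cons.mp ((hmem w).mpr hw) with h | h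
        · exact le_of_eq h.symm
        · exact le_of_lt (hvlt w h)
      have hdec := pvDecomp s v hs hmin
      set cnt := s.count v with hcnt
      set s'' := s.drop cnt with hs''def
      have hcpos : 0 < cnt := List.count_pos_iff.mpr hvs
      have hclen : cnt ≤ s.length := List.count_le_length
      have hlen'' : s''.length = s.length - cnt := by simp [hs''def]
      have hzero : s''.count v = 0 := by
        have := congrArg (List.count v) hdec
        rw [List.count_append, List.count_replicate_self] at this
        omega
      have hvnot : v ∉ s'' := List.count_eq_zero.mp hzero
      have hsub : s''.Sublist s := hs''def ▸ List.drop_sublist cnt s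
      have hs2 : s''.Pairwise (· ≤ ·) := hs.sublist hsub
      have hmem' : ∀ w, w ∈ ks ↔ w ∈ s'' := by
        intro w
        constructor
        · intro hw
          have hwne : w ≠ v := fun h => absurd (hvlt w hw) (by simp [h])
          have hws : w ∈ s := (hmem w).mp (List.mem_cons.mpr (Or.inr hw))
          rw [hdec] at hws
          rcases List.mem_append.mp hws with h | h
          · exact absurd (List.eq_of_mem_replicate h) hwne
          · exact h
        · intro hw
          have hws : w ∈ s := hsub.subset hw
          rcases List.mem_cons.mp ((hmem w).mpr hws) with h | h
          · exact absurd (h ▸ hw) hvnot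
          · exact h
      have hc' : ∀ w ∈ ks, c w = (s''.count w : Int) := by
        intro w hw
        have hwne : w ≠ v := fun h => absurd (hvlt w hw) (by simp [h])
        have := congrArg (List.count w) hdec
        rw [List.count_append] at this
        have hrep : (List.replicate cnt v).count w = 0 := by
          simp only [List.count_replicate]
          rw [if_neg]
          simpa using fun h => hwne h.symm
        rw [hc w (List.mem_cons.mpr (Or.inr hw))]
        omega
      have hcv : c v = (cnt : Int) := hc v List.mem_cons_self
      -- the first step of B's loop
      rw [List.foldl_cons, pvStep, if_neg (not_le.mpr hrem0), hcv]
      set t : Int := if (cnt : Int) < rem then (cnt : Int) else rem with ht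
      have htv : 0 ≤ t := by rw [ht]; split <;> omega
      have hrem' : (rem - t).toNat ≤ s''.length := by
        rw [ht] at *; split_ifs with h <;> omega
      rw [ih s'' (pvBump r (v - 1) t) (rem - t) hs2 hks' hmem' hc' hrem']
      -- now rewrite the right-hand side
      conv_rhs => rw [hdec, List.take_append, List.take_replicate,
        List.length_replicate, List.foldl_append, pvBump_repl]
      have h1 : ((min rem.toNat cnt : Nat) : Int) = t := by
        rw [ht]; split_ifs with h <;> simp <;> omega
      have h2 : rem.toNat - cnt = (rem - t).toNat := by
        rw [ht]; split_ifs with h <;> omega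
      rw [h1, h2]

lemma pvFoldRange (s : List Int) (f : List Int → Int → List Int) (r : List Int) (m : Nat)
    (hm : m ≤ s.length) :
    (List.range m).foldl (fun r i => f r (s.getD i 0)) r = (s.take m).foldl f r := by
  induction m with
  | zero => simp
  | succ m ih =>
    have hlt : m < s.length := by omega
    rw [List.range_succ, List.foldl_append, ih (by omega), List.take_add_one,
      List.getElem?_eq_getElem hlt, List.foldl_append]
    simp [List.getD, List.getElem?_eq_getElem hlt]

lemma pvFoldA (s : List Int) (k : Int) (f : List Int → Int → List Int) (r : List Int)
    (hk : k.toNat ≤ s.length) :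
    (PySem.List.pyRange 0 k 1).foldl (fun r i => f r (PySem.List.pyGetD s i 0)) r
      = (s.take k.toNat).foldl f r := by
  by_cases hkn : k ≤ 0
  · rw [PySem.List.pyRange_of_pos 0 k (by norm_num)]
    simp [Int.toNat_of_nonpos hkn, show ¬ (0:Int) < k by omega]
  · rw [not_le] at hkn
    obtain ⟨m, rfl⟩ : ∃ m : Nat, k = (m : Int) := ⟨k.toNat, by omega⟩
    rw [PySem.List.pyRange_zero_natCast, List.foldl_map]
    simp only [PySem.List.pyGetD_natCast, Int.toNat_natCast]
    exact pvFoldRange s f r m (by simpa using hk)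

-- ===== VERDICT (by name: the statement is the Claim_ definition above) =====
theorem calc_py_spec : Claim_equal_calc_py := by
  intro n k a _ hpre
  by_cases hk : k ≥ n
  · simp only [Spec_calc_py, calc_py, calc_py_alt, if_pos hk]
  · simp only [Spec_calc_py, calc_py, calc_py_alt, if_neg hk]
    unfold Pre_calc_py at hpre
    rw [if_neg hk] at hpre
    set s := PySem.List.sorted a (fun x => x) with hsdef
    have hslen : s.length = a.length := by rw [hsdef, PySem.List.length_sorted]
    have hlen : k.toNat ≤ s.length := by
      rcases hpre with h | ⟨h, _⟩ <;> omega
    have hcount : ∀ v : Int, a.count v = s.count v :=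
      fun v => ((PySem.List.sorted_perm a (fun x => x) false).count_eq v).symm
    -- B side: the hand-rolled counting loop is Counter(a)
    rw [PySem.Dict.foldl_insert_getD_add_one_eq_counter, PySem.Dict.keys_counter]
    set c : Int → Int := fun v => (s.count v : Int) with hcdef
    have hstep : (PySem.List.sorted (PySem.Set.ofList a) (fun x => x)).foldl
        (fun (st : List Int × Int) v =>
          if st.2 ≤ 0 then st
          else
            (PySem.List.pySetD st.1 (v - 1) (PySem.List.pyGetD st.1 (v - 1) 0 +
               (if (PySem.Dict.counter a).getD v 0 < st.2 then (PySem.Dict.counter a).getD v 0 else st.2)),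
             st.2 - (if (PySem.Dict.counter a).getD v 0 < st.2 then (PySem.Dict.counter a).getD v 0 else st.2)))
        (PySem.List.pyRepeat [0] n, k)
        = (PySem.List.sorted (PySem.Set.ofList a) (fun x => x)).foldl (pvStep c)
            (PySem.List.pyRepeat [0] n, k) := by
      apply PySem.List.foldl_congr_mem
      intro st v _
      simp only [pvStep, pvBump, PySem.Dict.getD_counter, hcount v, hcdef]
    rw [hstep]
    rw [pvMain c (PySem.List.sorted (PySem.Set.ofList a) (fun x => x)) s
        (PySem.List.pyRepeat [0] n) k
        (by simpa [hsdef] using PySem.List.sorted_pairwise a (fun x => x))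
        (PySem.List.sorted_ofList_pairwise_lt a)
        (by intro w; rw [PySem.List.mem_sorted, PySem.Set.mem_ofList, hsdef, PySem.List.mem_sorted])
        (fun v _ => rfl) hlen]
    rw [pvFoldA s k
        (fun r v => PySem.List.pySetD r (v - 1) (PySem.List.pyGetD r (v - 1) 0 + 1))
        (PySem.List.pyRepeat [0] n) hlen]
    rfl
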